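-- pv_equiv track=rewrite | github.com/sahilsh4rma/Python-practice | 10th.py | lyricsOp
-- ===== SOURCE A (Python) =====
-- def lyricsOp(song_list):
--     words=[]
--     need_words=[]
--     max_freq=0
--     for i in song_list:
--         if i not in words and song_list.count(i)>max_freq:
--             words.append(i)
--             max_freq=song_list.count(i)
--     for j in words:
--         if song_list.count(j)==max_freq:
--             need_words.append(j)
--     return (need_words,max_freq)
-- ===== SOURCE B (Python) =====
-- def lyricsOp(song_list):
--     counts = {}
--     for w in song_list:
--         counts[w] = counts.get(w, 0) + 1
--     if not counts:
--         return ([], 0)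
--     word, freq = max(counts.items(), key=lambda kv: kv[1])
--     return ([word], freq)
-- ===== Notes on version B (the rewrite author's own statement) =====
-- stated objective: faster
-- what changed: B builds a frequency dictionary in one pass and takes the first maximal entry with max(), instead of A's repeated list.count scans and two candidate-building passes.
import Mathlib
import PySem

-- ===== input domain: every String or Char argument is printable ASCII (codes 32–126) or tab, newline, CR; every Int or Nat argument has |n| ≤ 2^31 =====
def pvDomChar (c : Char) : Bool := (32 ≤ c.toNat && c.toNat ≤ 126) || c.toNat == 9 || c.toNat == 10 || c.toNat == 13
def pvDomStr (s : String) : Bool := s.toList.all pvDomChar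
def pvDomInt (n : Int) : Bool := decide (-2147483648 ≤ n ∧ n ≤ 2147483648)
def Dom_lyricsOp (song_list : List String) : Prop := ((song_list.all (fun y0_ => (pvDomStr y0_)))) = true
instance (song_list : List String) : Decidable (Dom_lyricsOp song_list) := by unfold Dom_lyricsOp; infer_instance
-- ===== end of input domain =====

-- B replaces A's repeated list.count scans with a one-pass frequency dictionary plus a single max() selection (faster).

-- ===== PORT A =====
def lyricsOp (song_list : List String) : List String × Int :=
  let st := song_list.foldl
    (fun (st : List String × Int) i =>
      if !st.1.contains i && decide ((PySem.List.count song_list i : Int) > st.2) then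
        (st.1 ++ [i], (PySem.List.count song_list i : Int))
      else st)
    ([], 0)
  let need_words := st.1.foldl
    (fun acc j => if ((PySem.List.count song_list j : Int) == st.2) then acc ++ [j] else acc) []
  (need_words, st.2)

-- ===== PORT B =====
def lyricsOp_alt (song_list : List String) : List String × Int :=
  let counts := song_list.foldl (fun d w => d.insert w (d.getD w 0 + 1))
    (PySem.Dict.empty : PySem.Dict String Int)
  match PySem.List.max? counts.items (fun kv => kv.2) with
  | none => ([], 0)
  | some (word, freq) => ([word], freq)

-- ===== PRECONDITION & SPEC =====
def Spec_lyricsOp (song_list : List String) (out : List String × Int) : Prop := out = lyricsOp_alt song_list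
instance (song_list : List String) (out : List String × Int) : Decidable (Spec_lyricsOp song_list out) := by unfold Spec_lyricsOp; infer_instance

-- ===== CLAIM (what is proved, stated in full; the proofs are below) =====
def Claim_equal_lyricsOp : Prop := ∀ (song_list : List String), Dom_lyricsOp song_list → Spec_lyricsOp song_list (lyricsOp song_list)

-- ===== LEMMAS AND PROOFS =====

-- count of x in l, as a Python int
def cntI (l : List String) (x : String) : Int := (List.count x l : Int)

-- the common characterisation: first element of l with maximal count, paired with that count
def pvTarget (l : List String) : List String × Int :=
  match PySem.List.max? l (cntI l) with
  | none => ([], 0)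
  | some w => ([w], cntI l w)

-- the step of the running first-maximum fold (max? with an Int key), named
def stepK (key : String → Int) (acc : Option String) (x : String) : Option String :=
  match acc with
  | none => some x
  | some m => if key m < key x then some x else some m

-- the step of A's first loop, named
def stepW (l : List String) (st : List String × Int) (i : String) : List String × Int :=
  if !st.1.contains i && decide ((PySem.List.count l i : Int) > st.2) then
    (st.1 ++ [i], (PySem.List.count l i : Int))
  else st

theorem max?_stepK (key : String → Int) (t : List String) :
    PySem.List.max? t key = List.foldl (stepK key) none t := by
  unfold PySem.List.max?
  congr 1
  funext a x
  cases a <;> rfl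

theorem stepK_some_lt (key : String → Int) {m x : String} (h : key m < key x) :
    stepK key (some m) x = some x := by
  show (if key m < key x then some x else some m) = some x
  rw [if_pos h]

theorem stepK_some_ge (key : String → Int) {m x : String} (h : ¬ key m < key x) :
    stepK key (some m) x = some m := by
  show (if key m < key x then some x else some m) = some m
  rw [if_neg h]

theorem stepW_pos (l : List String) {st : List String × Int} {i : String}
    (h : (!st.1.contains i && decide ((PySem.List.count l i : Int) > st.2)) = true) :
    stepW l st i = (st.1 ++ [i], (PySem.List.count l i : Int)) := by
  unfold stepW; rw [if_pos h]

theorem stepW_neg (l : List String) {st : List String × Int} {i : String}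
    (h : (!st.1.contains i && decide ((PySem.List.count l i : Int) > st.2)) = false) :
    stepW l st i = st := by
  unfold stepW; rw [h]; simp

-- max? is insensitive to first-occurrence dedup (PySem.Set.ofList)
theorem max?_addfold (key : String → Int) :
    ∀ (t s : List String),
      PySem.List.max? (List.foldl PySem.Set.add s t) key
      = List.foldl (stepK key) (PySem.List.max? s key) t := by
  intro t
  induction t with
  | nil => intro s; simp [max?_stepK]
  | cons x r ih =>
    intro s
    have hstep : PySem.List.max? (PySem.Set.add s x) key = stepK key (PySem.List.max? s key) x := by
      by_cases hc : PySem.Set.contains s x = true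
      · have hadd : PySem.Set.add s x = s := by unfold PySem.Set.add; rw [if_pos hc]
        have hx : x ∈ s := by
          have : List.contains s x = true := hc
          simpa using this
        cases hm : PySem.List.max? s key with
        | none => exact absurd ((PySem.List.max?_eq_none_iff s key).mp hm) (by rintro rfl; simp at hx)
        | some m =>
          have hle := PySem.List.max?_isMax hm x hx
          rw [hadd, hm, stepK_some_ge key (not_lt.mpr hle)]
      · have hadd : PySem.Set.add s x = s ++ [x] := by
          unfold PySem.Set.add; rw [if_neg hc]
        rw [hadd, max?_stepK, max?_stepK, List.foldl_append, List.foldl_cons, List.foldl_nil]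
    rw [List.foldl_cons, ih (PySem.Set.add s x), hstep, List.foldl_cons]

theorem max?_ofList (key : String → Int) (l : List String) :
    PySem.List.max? (PySem.Set.ofList l) key = PySem.List.max? l key := by
  have h := max?_addfold key l []
  rw [max?_stepK key l]
  exact h

-- max? over a mapped list, when the key factors through the map
theorem max?_map {α β : Type} (f : α → β) (key : β → Int) (xs : List α) :
    PySem.List.max? (xs.map f) key = (PySem.List.max? xs (fun y => key (f y))).map f := by
  suffices h : ∀ acc : Option α,
      List.foldl (fun acc x => match acc with
        | none => some x
        | some m => if key m < key x then some x else some m) (acc.map f) (xs.map f)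
      = (List.foldl (fun acc x => match acc with
        | none => some x
        | some m => if (fun y => key (f y)) m < (fun y => key (f y)) x then some x else some m) acc xs).map f by
    simpa [PySem.List.max?] using h none
  induction xs with
  | nil => intro acc; rfl
  | cons x t ih =>
    intro acc
    cases acc with
    | none => simpa using ih (some x)
    | some m =>
      simp only [List.map_cons, List.foldl_cons, Option.map_some]
      by_cases h : key (f m) < key (f x)
      · simp only [h, if_pos]; simpa using ih (some x)
      · simp only [h, if_neg, not_false_iff]; simpa using ih (some m)

-- invariant relating A's first loop state to the running first-maximum
def RelA (l words : List String) (mx : Int) (macc : Option String) : Prop :=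
  match macc with
  | none => words = [] ∧ mx = 0
  | some w => ∃ ws, words = ws ++ [w] ∧ mx = cntI l w ∧ ∀ u ∈ ws, cntI l u < mx

theorem foldA (l : List String) :
    ∀ (t words : List String) (mx : Int) (macc : Option String),
      (∀ i ∈ t, i ∈ l) → RelA l words mx macc →
      RelA l (List.foldl (stepW l) (words, mx) t).1 (List.foldl (stepW l) (words, mx) t).2
        (List.foldl (stepK (cntI l)) macc t) := by
  intro t
  induction t with
  | nil => intro words mx macc _ hR; exact hR
  | cons i r ih =>
    intro words mx macc hmem hR
    have hil : i ∈ l := hmem i List.mem_cons_self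
    have hcnt : (PySem.List.count l i : Int) = cntI l i := by
      simp [PySem.List.count_eq, cntI]
    have hcpos : (0:Int) < cntI l i := by
      have h0 : 0 < List.count i l := List.count_pos_iff.mpr hil
      unfold cntI; exact_mod_cast h0
    have hmem' : ∀ j ∈ r, j ∈ l := fun j hj => hmem j (List.mem_cons_of_mem _ hj)
    cases macc with
    | none =>
      obtain ⟨hw, hm⟩ := hR
      subst hw; subst hm
      have hcond : (!([] : List String).contains i
          && decide ((PySem.List.count l i : Int) > (0:Int))) = true := by
        rw [hcnt]; simp [hcpos]
      rw [List.foldl_cons, List.foldl_cons, stepW_pos l hcond]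
      have hK : stepK (cntI l) none i = some i := rfl
      rw [hK]
      exact ih ([] ++ [i]) (PySem.List.count l i) (some i) hmem'
        ⟨[], rfl, hcnt.symm, by simp⟩
    | some w =>
      obtain ⟨ws, hw, hm, hlt⟩ := hR
      subst hw
      have hbound : ∀ u ∈ ws ++ [w], cntI l u ≤ mx := by
        intro u hu
        rcases List.mem_append.mp hu with h | h
        · exact le_of_lt (hlt u h)
        · simp only [List.mem_singleton] at h; subst h; exact le_of_eq hm.symm
      by_cases hgt : mx < cntI l i
      · have hnc : ((ws ++ [w]).contains i) = false := by
          rw [List.contains_eq_mem]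
          simp only [decide_eq_false_iff_not]
          intro hin
          exact absurd (hbound i hin) (not_le.mpr hgt)
        have hcond : (!(ws ++ [w]).contains i
            && decide ((PySem.List.count l i : Int) > mx)) = true := by
          rw [hnc, hcnt]; simp [hgt]
        have hgt' : cntI l w < cntI l i := hm ▸ hgt
        rw [List.foldl_cons, List.foldl_cons, stepW_pos l hcond,
            stepK_some_lt (cntI l) hgt']
        refine ih (ws ++ [w] ++ [i]) (PySem.List.count l i) (some i) hmem'
          ⟨ws ++ [w], rfl, hcnt.symm, ?_⟩
        intro u hu
        rw [hcnt]
        exact lt_of_le_of_lt (hbound u hu) hgt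
      · have hgt2 : ¬ ((PySem.List.count l i : Int) > mx) := by rw [hcnt]; exact hgt
        have hcond : (!(ws ++ [w]).contains i
            && decide ((PySem.List.count l i : Int) > mx)) = false := by
          rw [decide_eq_false hgt2, Bool.and_false]
        have hgt3 : ¬ cntI l w < cntI l i := hm ▸ hgt
        rw [List.foldl_cons, List.foldl_cons, stepW_neg l hcond,
            stepK_some_ge (cntI l) hgt3]
        exact ih (ws ++ [w]) mx (some w) hmem' ⟨ws, rfl, hm, hlt⟩

theorem lyricsOp_eq (l : List String) :
    lyricsOp l
    = (let st := List.foldl (stepW l) ([], 0) l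
       let need_words := st.1.foldl
         (fun acc j => if ((PySem.List.count l j : Int) == st.2) then acc ++ [j] else acc) []
       (need_words, st.2)) := rfl

theorem lyricsOp_eq_target (l : List String) : lyricsOp l = pvTarget l := by
  have h := foldA l l [] 0 none (fun _ h => h) ⟨rfl, rfl⟩
  rw [← max?_stepK (cntI l) l] at h
  rw [lyricsOp_eq l]
  show ((List.foldl (stepW l) ([], 0) l).1.foldl
      (fun acc j => if ((PySem.List.count l j : Int) == (List.foldl (stepW l) ([], 0) l).2)
        then acc ++ [j] else acc) [],
    (List.foldl (stepW l) ([], 0) l).2) = pvTarget l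
  unfold pvTarget
  cases hm : PySem.List.max? l (cntI l) with
  | none =>
    rw [hm] at h
    obtain ⟨hw, hx⟩ := h
    simp only [hw, hx, List.foldl_nil]
  | some w =>
    rw [hm] at h
    obtain ⟨ws, hw, hmx, hlt⟩ := h
    simp only [hw, hmx]
    have hfilter : (ws ++ [w]).filter (fun j => ((PySem.List.count l j : Int) == cntI l w)) = [w] := by
      rw [List.filter_append]
      have h1 : ws.filter (fun j => ((PySem.List.count l j : Int) == cntI l w)) = [] := by
        rw [List.filter_eq_nil_iff]
        intro u hu
        have hu2 := hlt u hu
        rw [hmx] at hu2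
        simp only [beq_iff_eq, PySem.List.count_eq, cntI] at hu2 ⊢
        omega
      have h2 : [w].filter (fun j => ((PySem.List.count l j : Int) == cntI l w)) = [w] := by
        simp [PySem.List.count_eq, cntI]
      rw [h1, h2]; rfl
    have hfold := PySem.List.foldl_append_if
      (fun j => ((PySem.List.count l j : Int) == cntI l w)) (fun j => j) (ws ++ [w]) []
    rw [hfilter] at hfold
    rw [hfold]
    rfl

theorem lyricsOp_alt_eq_target (l : List String) : lyricsOp_alt l = pvTarget l := by
  unfold lyricsOp_alt
  rw [PySem.Dict.foldl_insert_getD_add_one_eq_counter]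
  show (match PySem.List.max? (PySem.Dict.counter l).items (fun kv => kv.2) with
    | none => ([], 0)
    | some (word, freq) => ([word], freq)) = pvTarget l
  rw [PySem.Dict.items_counter]
  rw [max?_map (fun k => (k, (List.count k l : Int))) (fun kv => kv.2) (PySem.Set.ofList l)]
  rw [show (fun y => (fun kv : String × Int => kv.2) ((fun k => (k, (List.count k l : Int))) y)) = cntI l from rfl]
  rw [max?_ofList (cntI l) l]
  unfold pvTarget
  cases hm : PySem.List.max? l (cntI l) with
  | none => rfl
  | some w => simp [cntI]

-- ===== VERDICT (by name: the statement is the Claim_ definition above) =====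
theorem lyricsOp_spec : Claim_equal_lyricsOp := by
  intro l _
  unfold Spec_lyricsOp
  rw [lyricsOp_eq_target, lyricsOp_alt_eq_target]
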